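-- pv_equiv track=rewrite | github.com/Will-Murphy/steganography | src/steg_utils.py | get_bit_mask
-- ===== SOURCE A (Python) =====
-- def get_bit_mask(bits):
--    """
--    Return integer representing bit mask for n zeroed bits
--    of cover img.
--    """
--    mask = ''
--    for i in range(8):
--       if(i< 8-bits):
--          mask = mask + '1'
--       else:
--          mask = mask + '0'
--    return int(mask,2)
-- ===== SOURCE B (Python) =====
-- def get_bit_mask(bits):
--     """
--     Return integer representing bit mask for n zeroed bits
--     of cover img.
--     """
--     n = max(0, min(8, 8 - bits))       # clamped count of leading one-bits
--     return ((1 << n) - 1) << (8 - n)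
-- ===== Notes on version B (the rewrite author's own statement) =====
-- stated objective: simpler
-- what changed: Replaced the string-building loop and base-2 string parse with a closed-form arithmetic mask: clamp the count of leading one-bits to the byte width and produce the mask with two shifts.
import Mathlib
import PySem

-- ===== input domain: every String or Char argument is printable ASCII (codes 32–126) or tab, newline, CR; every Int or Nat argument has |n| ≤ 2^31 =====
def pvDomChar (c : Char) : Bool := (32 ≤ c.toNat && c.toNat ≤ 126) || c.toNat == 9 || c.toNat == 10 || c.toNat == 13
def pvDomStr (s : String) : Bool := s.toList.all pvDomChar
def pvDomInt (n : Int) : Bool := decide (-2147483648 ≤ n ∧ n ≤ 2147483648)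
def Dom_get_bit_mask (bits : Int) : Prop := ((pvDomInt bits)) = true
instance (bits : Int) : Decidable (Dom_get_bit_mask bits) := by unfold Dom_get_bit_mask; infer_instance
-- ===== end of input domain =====

-- B replaces the 8-step string-building loop and base-2 parse with a closed-form
-- arithmetic mask (clamped shift), for simplicity; behaviour is identical on all ints.


-- ===== PORT A =====
-- int(mask, 2): hand port of Python's base-2 parse, exact here because mask
-- is always exactly eight '0'/'1' characters
def pvParseBin (s : String) : Int :=
  s.toList.foldl (fun acc c => acc * 2 + (if c = '1' then 1 else 0)) 0

def get_bit_mask (bits : Int) : Int :=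
  let mask := (PySem.List.pyRange 0 8 1).foldl
    (fun m i => if i < 8 - bits then m ++ "1" else m ++ "0") ""
  pvParseBin mask

-- ===== PORT B =====
-- the shift counts are clamped nonnegative, so .toNat is exact for Python's shifts
def get_bit_mask_alt (bits : Int) : Int :=
  let n := max 0 (min 8 (8 - bits))
  ((1 <<< n.toNat) - 1) <<< (8 - n).toNat

-- ===== PRECONDITION & SPEC =====
def Spec_get_bit_mask (bits : Int) (out : Int) : Prop := out = get_bit_mask_alt bits
instance (bits : Int) (out : Int) : Decidable (Spec_get_bit_mask bits out) := by unfold Spec_get_bit_mask; infer_instance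

-- ===== CLAIM (what is proved, stated in full; the proofs are below) =====
def Claim_equal_get_bit_mask : Prop := ∀ (bits : Int), Dom_get_bit_mask bits → Spec_get_bit_mask bits (get_bit_mask bits)

-- ===== LEMMAS AND PROOFS =====

-- ===== VERDICT (by name: the statement is the Claim_ definition above) =====
theorem pyRange8 : PySem.List.pyRange 0 8 1 = [0,1,2,3,4,5,6,7] := by decide

theorem get_bit_mask_spec : Claim_equal_get_bit_mask := by
  intro bits _
  show get_bit_mask bits = get_bit_mask_alt bits
  by_cases h : bits ≤ 0
  · -- all eight conditions i < 8 - bits hold, mask = "11111111"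
    unfold get_bit_mask get_bit_mask_alt
    rw [pyRange8]
    simp only [List.foldl]
    repeat rw [if_pos (by omega)]
    have hn : max 0 (min 8 (8 - bits)) = 8 := by omega
    rw [hn]
    decide
  · by_cases h8 : 8 ≤ bits
    · -- no condition holds, mask = "00000000"
      unfold get_bit_mask get_bit_mask_alt
      rw [pyRange8]
      simp only [List.foldl]
      repeat rw [if_neg (by omega)]
      have hn : max 0 (min 8 (8 - bits)) = 0 := by omega
      rw [hn]
      decide
    · push Not at h h8
      interval_cases bits <;> decide
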